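-- pv_equiv track=rewrite | github.com/GonziFlowReloaded/ProbabilidadYEstadisticaTool | main.py | contar_frecuencias
-- ===== SOURCE A (Python) =====
-- def contar_frecuencias(intervalos, datos):
--     auxIntervalos = list(zip(intervalos[:-1], intervalos[1:]))
--     frecuencias = [sum(1 for dato in datos if intervalo[0] <= dato < intervalo[1]) for intervalo in auxIntervalos]
--     maximos = 0
--     maximo = max(datos)
--     for dato in datos:
--         if dato == maximo:
--             maximos += 1
--
--     frecuencias[len(frecuencias)-1] += maximos
--     return frecuencias, auxIntervalos
-- ===== SOURCE B (Python) =====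
-- def _bisect_left(s, x):
--     lo, hi = 0, len(s)
--     while lo < hi:
--         mid = (lo + hi) // 2
--         if s[mid] < x:
--             lo = mid + 1
--         else:
--             hi = mid
--     return lo
--
--
-- def contar_frecuencias(intervalos, datos):
--     auxIntervalos = list(zip(intervalos[:-1], intervalos[1:]))
--     s = sorted(datos)
--     frecuencias = [max(0, _bisect_left(s, b) - _bisect_left(s, a))
--                    for a, b in auxIntervalos]
--     frecuencias[-1] += len(s) - _bisect_left(s, s[-1])
--     return frecuencias, auxIntervalos
-- ===== Notes on version B (the rewrite author's own statement) =====
-- stated objective: faster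
-- what changed: Instead of scanning all of datos once per bin, B sorts datos once and computes each bin count as a difference of two binary searches (hand-written bisect_left), and the max-count adjustment as len(s) - bisect_left(s, s[-1]).
-- outside the precondition, e.g. on contar_frecuencias([1, 2], []): A raises ValueError, B raises IndexError; on contar_frecuencias([5], [1, 2]): A raises IndexError, B raises IndexError
import Mathlib
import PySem

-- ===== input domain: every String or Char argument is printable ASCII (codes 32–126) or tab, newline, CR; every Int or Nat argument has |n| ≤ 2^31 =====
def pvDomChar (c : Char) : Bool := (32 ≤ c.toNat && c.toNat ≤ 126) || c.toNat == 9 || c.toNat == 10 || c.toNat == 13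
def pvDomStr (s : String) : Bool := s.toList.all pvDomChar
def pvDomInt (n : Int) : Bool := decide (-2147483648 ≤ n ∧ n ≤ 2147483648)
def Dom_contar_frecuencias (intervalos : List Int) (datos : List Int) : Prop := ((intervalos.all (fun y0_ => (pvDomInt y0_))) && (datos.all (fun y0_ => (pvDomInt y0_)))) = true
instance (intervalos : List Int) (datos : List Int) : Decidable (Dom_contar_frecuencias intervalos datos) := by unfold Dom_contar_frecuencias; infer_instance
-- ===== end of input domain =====

-- B replaces the per-bin linear scan of A by one sort of the data plus binary searches
-- (bisect_left) per bin boundary; objective: faster.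

-- ===== PORT A =====
def contar_frecuencias (intervalos : List Int) (datos : List Int) : List Int × (List (Int × Int)) :=
  let auxIntervalos := List.zip (PySem.List.slice intervalos none (some (-1))) (PySem.List.slice intervalos (some 1) none)
  let frecuencias := auxIntervalos.map (fun p => ((datos.countP (fun d => decide (p.1 ≤ d) && decide (d < p.2))) : Int))
  let maximo := (PySem.List.max? datos (fun x => x)).getD 0
  let maximos := datos.foldl (fun acc d => if d == maximo then acc + 1 else acc) (0 : Int)
  let frec2 := frecuencias.set (frecuencias.length - 1) (frecuencias.getD (frecuencias.length - 1) 0 + maximos)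
  (frec2, auxIntervalos)

-- ===== PORT B =====
def contar_frecuencias_alt (intervalos : List Int) (datos : List Int) : List Int × (List (Int × Int)) :=
  let auxIntervalos := List.zip (PySem.List.slice intervalos none (some (-1))) (PySem.List.slice intervalos (some 1) none)
  let s := PySem.List.sorted datos (fun x => x)
  let frecuencias := auxIntervalos.map (fun p =>
    max 0 ((PySem.List.bisectLeft s p.2 : Int) - (PySem.List.bisectLeft s p.1 : Int)))
  let m := (PySem.List.pyGet? s (-1)).getD 0
  let frec2 := frecuencias.set (frecuencias.length - 1)
    (frecuencias.getD (frecuencias.length - 1) 0 + ((s.length : Int) - (PySem.List.bisectLeft s m : Int)))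
  (frec2, auxIntervalos)

-- ===== PRECONDITION & SPEC =====
-- Pre_ excludes exactly the inputs on which A raises: empty datos (max([]) is a ValueError)
-- and intervalos with fewer than two elements (frecuencias is empty, so frecuencias[-1] is an IndexError).
def Pre_contar_frecuencias (intervalos : List Int) (datos : List Int) : Prop :=
  datos ≠ [] ∧ 2 ≤ intervalos.length
instance (intervalos : List Int) (datos : List Int) : Decidable (Pre_contar_frecuencias intervalos datos) := by unfold Pre_contar_frecuencias; infer_instance
def pvWitness_contar_frecuencias : List Int × List Int := ([0, 5, 10], [1, 7, 7, 3])

def Spec_contar_frecuencias (intervalos : List Int) (datos : List Int) (out : List Int × (List (Int × Int))) : Prop := out = contar_frecuencias_alt intervalos datos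
instance (intervalos : List Int) (datos : List Int) (out : List Int × (List (Int × Int))) : Decidable (Spec_contar_frecuencias intervalos datos out) := by unfold Spec_contar_frecuencias; infer_instance

-- ===== CLAIM (what is proved, stated in full; the proofs are below) =====
def Claim_equal_contar_frecuencias : Prop := ∀ (intervalos : List Int) (datos : List Int), Dom_contar_frecuencias intervalos datos → Pre_contar_frecuencias intervalos datos → Spec_contar_frecuencias intervalos datos (contar_frecuencias intervalos datos)

-- ===== LEMMAS AND PROOFS =====

-- countP of a predicate that holds exactly on the first c indices is c
theorem pv_countP_eq_of_cut (p : Int → Bool) (l : List Int) (c : Nat) (hc : c ≤ l.length)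
    (h1 : ∀ j (hj : j < l.length), j < c → p l[j] = true)
    (h2 : ∀ j (hj : j < l.length), c ≤ j → p l[j] = false) :
    l.countP p = c := by
  induction l generalizing c with
  | nil => simp at hc ⊢; omega
  | cons x t ih =>
    cases c with
    | zero =>
      have hx : p x = false := h2 0 (by simp) (by omega)
      have ht : t.countP p = 0 := by
        apply ih 0 (by omega)
        · intro j hj hj0; omega
        · intro j hj _; exact h2 (j+1) (by simpa using Nat.succ_lt_succ hj) (by omega)
      simp [hx, ht]
    | succ c' =>
      have hx : p x = true := h1 0 (by simp) (by omega)
      have ht : t.countP p = c' := by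
        apply ih c' (by simpa using hc)
        · intro j hj hjc; exact h1 (j+1) (by simpa using Nat.succ_lt_succ hj) (by omega)
        · intro j hj hcj; exact h2 (j+1) (by simpa using Nat.succ_lt_succ hj) (by omega)
      simp [hx, ht]

-- on a sorted list, bisect_left x is the number of elements below x
theorem pv_bisectLeft_eq_countP (s : List Int) (x : Int)
    (hs : List.Pairwise (fun a b => a ≤ b) s) :
    PySem.List.bisectLeft s x = s.countP (fun d => decide (d < x)) := by
  obtain ⟨h0, h1, h2⟩ := PySem.List.bisectLeft_spec s x hs
  exact (pv_countP_eq_of_cut _ s _ h0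
    (fun j hj hjc => decide_eq_true (h1 j hj hjc))
    (fun j hj hcj => decide_eq_false (not_lt.mpr (h2 j hj hcj)))).symm

theorem pv_countP_interval (a b : Int) (hab : a ≤ b) (l : List Int) :
    l.countP (fun d => decide (d < b)) =
      l.countP (fun d => decide (a ≤ d) && decide (d < b)) + l.countP (fun d => decide (d < a)) := by
  induction l with
  | nil => simp
  | cons x t ih =>
    by_cases h1 : a ≤ x
    · by_cases h2 : x < b
      · simp [ih, h1, h2, not_lt.mpr h1]; omega
      · simp [ih, h1, h2, not_lt.mpr h1]
    · have h3 : x < a := lt_of_not_ge h1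
      simp [ih, h1, h3, lt_of_lt_of_le h3 hab]; omega

theorem pv_countP_le_of_le (a b : Int) (hba : b ≤ a) (l : List Int) :
    l.countP (fun d => decide (d < b)) ≤ l.countP (fun d => decide (d < a)) :=
  List.countP_mono_left (fun d _ hd => by simp at hd ⊢; omega)

-- per-bin equality
theorem pv_bin_eq (a b : Int) (datos : List Int) :
    ((datos.countP (fun d => decide (a ≤ d) && decide (d < b))) : Int) =
      max 0 ((PySem.List.bisectLeft (PySem.List.sorted datos (fun x => x)) b : Int)
        - (PySem.List.bisectLeft (PySem.List.sorted datos (fun x => x)) a : Int)) := by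
  have hs := PySem.List.sorted_pairwise datos (fun x => x)
  have hperm := PySem.List.sorted_perm datos (fun x => x) false
  rw [pv_bisectLeft_eq_countP _ _ hs, pv_bisectLeft_eq_countP _ _ hs,
    hperm.countP_eq, hperm.countP_eq]
  by_cases hab : a ≤ b
  · have h := pv_countP_interval a b hab datos
    have hle := pv_countP_le_of_le b a hab datos
    rw [max_eq_right (Int.sub_nonneg.mpr (by exact_mod_cast hle))]
    omega
  · have h0 : datos.countP (fun d => decide (a ≤ d) && decide (d < b)) = 0 :=
      List.countP_eq_zero.mpr (fun d _ => by simp; omega)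
    have h2 := pv_countP_le_of_le a b (by omega) datos
    rw [max_eq_left (sub_nonpos.mpr (by exact_mod_cast h2))]
    simp [h0]

-- counting the maximum value = length minus the elements below it
theorem pv_count_max (m : Int) (l : List Int) (h : ∀ y ∈ l, y ≤ m) :
    l.countP (fun d => d == m) + l.countP (fun d => decide (d < m)) = l.length := by
  induction l with
  | nil => simp
  | cons x t ih =>
    have hx : x ≤ m := h x (by simp)
    have ht := ih (fun y hy => h y (by simp [hy]))
    by_cases hxm : x = m
    · subst hxm
      simp
      omega
    · have hlt : x < m := lt_of_le_of_ne hx hxm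
      simp [hlt, beq_eq_false_iff_ne.mpr hxm]
      omega

-- the last element of a ≤-sorted list bounds every element
theorem pv_getLast_isMax (l : List Int) (hne : l ≠ [])
    (hs : List.Pairwise (fun a b => a ≤ b) l) :
    ∀ y ∈ l, y ≤ l.getLast hne := by
  intro y hy
  obtain ⟨i, hi, rfl⟩ := List.getElem_of_mem hy
  rw [List.getLast_eq_getElem]
  rcases Nat.lt_or_ge i (l.length - 1) with h | h
  · exact List.pairwise_iff_getElem.mp hs i (l.length - 1) hi (by omega) h
  · have : i = l.length - 1 := by omega
    simp [this]

-- ===== VERDICT (by name: the statement is the Claim_ definition above) =====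
theorem contar_frecuencias_spec : Claim_equal_contar_frecuencias := by
  intro intervalos datos _ hpre
  obtain ⟨hdne, _⟩ := hpre
  unfold Spec_contar_frecuencias contar_frecuencias contar_frecuencias_alt
  -- name the shared pieces
  set aux := List.zip (PySem.List.slice intervalos none (some (-1))) (PySem.List.slice intervalos (some 1) none) with haux
  set s := PySem.List.sorted datos (fun x => x) with hsdef
  have hs := PySem.List.sorted_pairwise datos (fun x => x)
  have hperm : s.Perm datos := PySem.List.sorted_perm datos (fun x => x) false
  have hsne : s ≠ [] := fun h => hdne ((PySem.List.sorted_eq_nil_iff _ _ _).mp h)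
  -- the frequency lists agree
  have hfrec : aux.map (fun p => ((datos.countP (fun d => decide (p.1 ≤ d) && decide (d < p.2))) : Int))
      = aux.map (fun p => max 0 ((PySem.List.bisectLeft s p.2 : Int) - (PySem.List.bisectLeft s p.1 : Int))) :=
    List.map_congr_left (fun p _ => pv_bin_eq p.1 p.2 datos)
  -- the two notions of maximum coincide
  obtain ⟨mA, hmA⟩ : ∃ mA, PySem.List.max? datos (fun x => x) = some mA := by
    cases hMA : PySem.List.max? datos (fun x => x) with
    | none => exact absurd ((PySem.List.max?_eq_none_iff _ _).mp hMA) hdne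
    | some m => exact ⟨m, rfl⟩
  have hmAmem : mA ∈ datos := PySem.List.max?_mem hmA
  have hmAmax : ∀ y ∈ datos, y ≤ mA := PySem.List.max?_isMax hmA
  have hlast : PySem.List.pyGet? s (-1) = some (s.getLast hsne) := by
    rw [PySem.List.pyGet?_neg_one, List.getLast?_eq_some_getLast hsne]
  have hBmax : ∀ y ∈ s, y ≤ s.getLast hsne := pv_getLast_isMax s hsne hs
  have hmeq : mA = s.getLast hsne :=
    le_antisymm (hBmax mA (hperm.mem_iff.mpr hmAmem))
      (hmAmax (s.getLast hsne) (hperm.mem_iff.mp (List.getLast_mem hsne)))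
  -- the last-bin increments agree
  have hinc : datos.foldl (fun acc d => if d == mA then acc + 1 else acc) (0 : Int)
      = (s.length : Int) - (PySem.List.bisectLeft s (s.getLast hsne) : Int) := by
    rw [PySem.List.foldl_if_add_one, pv_bisectLeft_eq_countP _ _ hs, hperm.countP_eq,
      hperm.length_eq, ← hmeq]
    have := pv_count_max mA datos hmAmax
    omega
  simp only [hmA, hlast, Option.getD_some, ← hfrec]
  rw [← hinc]
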